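-- pv_equiv track=rewrite | github.com/FDGod99/Advent-Of-Code | 2018/Day2_2018/day2_2018_1.py | appear_only_twice
-- ===== SOURCE A (Python) =====
-- def appear_only_twice(str):
--     temp = list(str)
--     my_set = list(set(temp))
--     letter = []
--     counter_arr = []
--     for i in my_set:
--         letter.append(i)
--         counter_arr.append(temp.count(i))
--     return(2 in counter_arr, 3 in counter_arr)
-- ===== SOURCE B (Python) =====
-- def appear_only_twice(str):
--     s = sorted(str)
--     if not s:
--         return (False, False)
--     has_two = False
--     has_three = False
--     prev = s[0]
--     run = 1
--     for ch in s[1:]: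
--         if ch == prev:
--             run += 1
--         else:
--             if run == 2:
--                 has_two = True
--             if run == 3:
--                 has_three = True
--             prev = ch
--             run = 1
--     if run == 2:
--         has_two = True
--     if run == 3:
--         has_three = True
--     return (has_two, has_three)
-- ===== Notes on version B (the rewrite author's own statement) =====
-- stated objective: alternative
-- what changed: Replaces the distinct-set plus per-element temp.count rescans with sorting the characters once and a single run-length scan that sets the two flags when a run of length 2 or 3 ends.
import Mathlib
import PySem

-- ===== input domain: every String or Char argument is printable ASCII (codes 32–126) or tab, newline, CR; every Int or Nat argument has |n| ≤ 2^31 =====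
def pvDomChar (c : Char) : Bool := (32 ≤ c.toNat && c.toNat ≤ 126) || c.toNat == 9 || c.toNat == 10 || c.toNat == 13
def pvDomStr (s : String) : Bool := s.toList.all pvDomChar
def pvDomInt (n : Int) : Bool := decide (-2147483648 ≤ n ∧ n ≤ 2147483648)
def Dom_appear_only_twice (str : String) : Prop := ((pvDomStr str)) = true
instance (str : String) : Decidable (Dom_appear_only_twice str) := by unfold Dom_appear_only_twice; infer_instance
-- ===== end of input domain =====

-- B sorts the characters once and does one run-length scan instead of A's distinct-set plus per-element count rescans (different algorithm, similar cost).

-- ===== PORT A =====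
def appear_only_twice (str : String) : Bool × Bool :=
  let temp := str.toList
  let my_set : PySem.Set Char := PySem.Set.ofList temp
  -- 'for i in my_set: letter.append(i); counter_arr.append(temp.count(i))'
  -- (the final membership tests do not depend on the set's iteration order)
  let st := my_set.foldl
    (fun (st : List Char × List Int) i => (st.1 ++ [i], st.2 ++ [(PySem.List.count temp i : Int)]))
    ([], [])
  (decide ((2 : Int) ∈ st.2), decide ((3 : Int) ∈ st.2))

-- ===== PORT B =====
-- the 'for ch in s[1:]' loop, carrying (prev, run, has_two, has_three); the final clause is the post-loop flush
def scanRuns : List Char → Char → Nat → Bool → Bool → Bool × Bool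
  | [], _, run, h2, h3 => (h2 || run == 2, h3 || run == 3)
  | ch :: rest, prev, run, h2, h3 =>
    if ch == prev then scanRuns rest prev (run + 1) h2 h3
    else scanRuns rest ch 1 (h2 || run == 2) (h3 || run == 3)

def appear_only_twice_alt (str : String) : Bool × Bool :=
  match PySem.List.sorted str.toList (fun x => x) false with
  | [] => (false, false)
  | c :: rest => scanRuns rest c 1 false false

-- ===== PRECONDITION & SPEC =====
def Spec_appear_only_twice (str : String) (out : Bool × Bool) : Prop := out = appear_only_twice_alt str
instance (str : String) (out : Bool × Bool) : Decidable (Spec_appear_only_twice str out) := by unfold Spec_appear_only_twice; infer_instance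

-- ===== CLAIM (what is proved, stated in full; the proofs are below) =====
def Claim_equal_appear_only_twice : Prop := ∀ (str : String), Dom_appear_only_twice str → Spec_appear_only_twice str (appear_only_twice str)

-- ===== LEMMAS AND PROOFS =====

/-- 'some character occurs exactly n times in m' as a Bool. -/
def hasCnt (n : Nat) (m : List Char) : Bool := m.any (fun d => m.count d == n)

lemma hasCnt_iff (n : Nat) (m : List Char) : hasCnt n m = true ↔ ∃ d ∈ m, m.count d = n := by
  simp [hasCnt]

lemma hasCnt_perm {m m' : List Char} (h : m.Perm m') (n : Nat) : hasCnt n m = hasCnt n m' := by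
  rcases hb : hasCnt n m'
  · rcases hb2 : hasCnt n m
    · rfl
    · rw [hasCnt_iff] at hb2
      rcases hb2 with ⟨d, hd, hc⟩
      have : hasCnt n m' = true := by
        rw [hasCnt_iff]
        exact ⟨d, h.mem_iff.mp hd, by rw [← h.count_eq]; exact hc⟩
      simp [this] at hb
  · rw [hasCnt_iff] at hb ⊢
    rcases hb with ⟨d, hd, hc⟩
    exact ⟨d, h.mem_iff.mpr hd, by rw [h.count_eq]; exact hc⟩

lemma hasCnt_replicate_append {c : Char} {m : List Char} (hm : c ∉ m) {k : Nat} (hk : 1 ≤ k)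
    (n : Nat) : hasCnt n (List.replicate k c ++ m) = ((k == n) || hasCnt n m) := by
  have hcount : ∀ d, (List.replicate k c ++ m).count d = (if d = c then k else m.count d) := by
    intro d
    by_cases hdc : d = c
    · subst hdc
      simp [List.count_append, List.count_eq_zero_of_not_mem hm]
    · have hcd : (c == d) = false := beq_eq_false_iff_ne.mpr (fun h => hdc h.symm)
      simp [List.count_append, List.count_replicate, hcd, hdc]
  rcases hb : ((k == n) || hasCnt n m)
  · simp only [Bool.or_eq_false_iff] at hb
    rcases hb with ⟨hkn, hmn⟩
    by_contra hx
    have hx' : hasCnt n (List.replicate k c ++ m) = true := by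
      cases h' : hasCnt n (List.replicate k c ++ m)
      · exact absurd h' hx
      · rfl
    rw [hasCnt_iff] at hx'
    rcases hx' with ⟨d, hd, hc⟩
    rw [hcount d] at hc
    by_cases hdc : d = c
    · simp [hdc] at hc; simp [hc] at hkn
    · simp [hdc] at hc
      rcases List.mem_append.mp hd with h1 | h1
      · exact hdc (List.eq_of_mem_replicate h1)
      · have : hasCnt n m = true := (hasCnt_iff n m).mpr ⟨d, h1, hc⟩
        simp [this] at hmn
  · rw [hasCnt_iff]
    rcases Bool.or_eq_true_iff.mp hb with hkn | hmn
    · refine ⟨c, ?_, ?_⟩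
      · exact List.mem_append.mpr (Or.inl (by simp [List.mem_replicate]; omega))
      · rw [hcount c]; simpa using hkn
    · rcases (hasCnt_iff n m).mp hmn with ⟨d, hd, hc⟩
      refine ⟨d, List.mem_append.mpr (Or.inr hd), ?_⟩
      have hdc : d ≠ c := fun h => hm (h ▸ hd)
      rw [hcount d]; simp [hdc, hc]

lemma scanRuns_spec (l : List Char) (c : Char) (k : Nat) (h2 h3 : Bool)
    (hs : l.Pairwise (· ≤ ·)) (hc : ∀ x ∈ l, c ≤ x) (hk : 1 ≤ k) :
    scanRuns l c k h2 h3 =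
      (h2 || hasCnt 2 (List.replicate k c ++ l), h3 || hasCnt 3 (List.replicate k c ++ l)) := by
  induction l generalizing c k h2 h3 with
  | nil =>
    have h2' := hasCnt_replicate_append (c := c) (m := []) (by simp) hk 2
    have h3' := hasCnt_replicate_append (c := c) (m := []) (by simp) hk 3
    simp only [scanRuns]
    rw [h2', h3']
    simp [hasCnt]
  | cons x l ih =>
    rcases List.pairwise_cons.mp hs with ⟨hxl, hl⟩
    by_cases hxc : x = c
    · subst hxc
      simp only [scanRuns, beq_self_eq_true, if_true]
      rw [ih x (k + 1) h2 h3 hl hxl (by omega)]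
      have hperm : (List.replicate (k + 1) x ++ l).Perm (List.replicate k x ++ x :: l) := by
        have : List.replicate (k + 1) x ++ l = x :: (List.replicate k x ++ l) := by
          simp [List.replicate_succ]
        rw [this]
        exact List.perm_middle.symm
      rw [hasCnt_perm hperm, hasCnt_perm hperm]
    · have hbx : (x == c) = false := by simp [hxc]
      simp only [scanRuns, hbx]
      rw [ih x 1 _ _ hl hxl (le_refl 1)]
      have hcx : c < x := lt_of_le_of_ne (hc x (List.mem_cons_self)) (Ne.symm hxc)
      have hnm : c ∉ x :: l := by
        intro hmem
        rcases List.mem_cons.mp hmem with h1 | h1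
        · exact hxc h1.symm
        · exact absurd (hxl c h1) (not_le_of_gt hcx)
      have e2 := hasCnt_replicate_append (m := x :: l) hnm hk 2
      have e3 := hasCnt_replicate_append (m := x :: l) hnm hk 3
      rw [e2, e3]
      have hrep1 : List.replicate 1 x ++ l = x :: l := by simp
      rw [hrep1]
      cases h2 <;> cases h3 <;> simp

lemma counter_arr_eq (temp : List Char) (s : List Char) (a : List Char) (b : List Int) :
    (s.foldl (fun (st : List Char × List Int) i =>
        (st.1 ++ [i], st.2 ++ [(PySem.List.count temp i : Int)])) (a, b)).2
      = b ++ s.map (fun i => (PySem.List.count temp i : Int)) := by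
  induction s generalizing a b with
  | nil => simp
  | cons x s ih =>
    simp only [List.foldl_cons]
    rw [ih]
    simp

lemma appear_only_twice_eq_hasCnt (str : String) :
    appear_only_twice str = (hasCnt 2 str.toList, hasCnt 3 str.toList) := by
  unfold appear_only_twice
  simp only [counter_arr_eq, List.nil_append]
  have key : ∀ n : Nat, (decide ((n : Int) ∈ (PySem.Set.ofList str.toList).map
      (fun i => (PySem.List.count str.toList i : Int)))) = hasCnt n str.toList := by
    intro n
    rcases hb : hasCnt n str.toList
    · simp only [decide_eq_false_iff_not]
      intro hmem
      rcases List.mem_map.mp hmem with ⟨i, hi, hci⟩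
      have hcnt : (str.toList.count i : Nat) = n := by
        simp [PySem.List.count] at hci; exact_mod_cast hci
      have : hasCnt n str.toList = true := by
        rw [hasCnt_iff]
        exact ⟨i, (PySem.Set.mem_ofList _ _).mp hi, hcnt⟩
      simp [this] at hb
    · simp only [decide_eq_true_iff]
      rcases (hasCnt_iff n str.toList).mp hb with ⟨d, hd, hc⟩
      refine List.mem_map.mpr ⟨d, (PySem.Set.mem_ofList _ _).mpr hd, ?_⟩
      simp [PySem.List.count, hc]
  have k2 := key 2
  have k3 := key 3
  simp only [Nat.cast_ofNat] at k2 k3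
  rw [k2, k3]

-- ===== VERDICT (by name: the statement is the Claim_ definition above) =====
theorem appear_only_twice_spec : Claim_equal_appear_only_twice := by
  intro str _
  unfold Spec_appear_only_twice
  rw [appear_only_twice_eq_hasCnt]
  unfold appear_only_twice_alt
  rcases hsort : PySem.List.sorted str.toList (fun x => x) false with _ | ⟨c, rest⟩
  · have hnil : str.toList = [] := (PySem.List.sorted_eq_nil_iff _ _ _).mp hsort
    show (hasCnt 2 str.toList, hasCnt 3 str.toList) = (false, false)
    simp [hnil, hasCnt]
  · have hperm : (c :: rest).Perm str.toList := hsort ▸ PySem.List.sorted_perm str.toList (fun x => x) false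
    have hpw : (c :: rest).Pairwise (· ≤ ·) := by
      have := PySem.List.sorted_pairwise str.toList (fun x => x)
      rw [hsort] at this
      exact this
    rcases List.pairwise_cons.mp hpw with ⟨hcl, hl⟩
    show (hasCnt 2 str.toList, hasCnt 3 str.toList) = scanRuns rest c 1 false false
    rw [scanRuns_spec rest c 1 false false hl hcl (le_refl 1)]
    rw [show List.replicate 1 c ++ rest = c :: rest from rfl]
    rw [hasCnt_perm hperm 2, hasCnt_perm hperm 3]
    simp
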